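-- pv_equiv track=rewrite | github.com/diegonoguerarec/tp_compiladores | analysis.py | analiza_sentimiento
-- ===== SOURCE A (Python) =====
-- from typing import List, Tuple, Dict, Any
--
-- def analiza_sentimiento(
--     words: List[str],
--     positivos: Dict[str,int],
--     negativos: Dict[str,int],
--     neutros: Dict[str,int]
-- ) -> Tuple[
--     int,
--     int, List[str], List[str], int,
--     int, List[str], List[str], int,
--     int, List[str]
-- ]:
--     """
--     Calcula:
--       - total: suma de todos los pesos (positivos + negativos)
--       - pos_count     y lista pos_words
--       - top_pos_words (todas con el peso máximo positivo) y top_pos_weight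
--       - neg_count     y lista neg_words
--       - top_neg_words (todas con el peso mínimo negativo) y top_neg_weight
--       - neut_count    y lista neut_words
--     """
--     total = 0
--     pos_list: List[Tuple[str,int]] = []
--     neg_list: List[Tuple[str,int]] = []
--     neut_list: List[str] = []
--
--     for w in words:
--         if w in positivos:
--             p = positivos[w]
--             total += p
--             pos_list.append((w, p))
--         elif w in negativos:
--             n = negativos[w]
--             total += n
--             neg_list.append((w, n))
--         elif w in neutros:
--             neut_list.append(w)
--
--     pos_count = len(pos_list)
--     neg_count = len(neg_list)
--     neut_count = len(neut_list)
--
--     pos_words = [w for w, _ in pos_list]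
--     neg_words = [w for w, _ in neg_list]
--
--     if pos_list:
--         top_pos_weight = max(p for _, p in pos_list)
--         top_pos_words = [w for w, p in pos_list if p == top_pos_weight]
--     else:
--         top_pos_weight = 0
--         top_pos_words = []
--
--     if neg_list:
--         top_neg_weight = min(n for _, n in neg_list)
--         top_neg_words = [w for w, n in neg_list if n == top_neg_weight]
--     else:
--         top_neg_weight = 0
--         top_neg_words = []
--
--     return (
--         total,
--         pos_count, pos_words, top_pos_words, top_pos_weight,
--         neg_count, neg_words, top_neg_words, top_neg_weight,
--         neut_count, neut_list
--     )
-- ===== SOURCE B (Python) =====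
-- def analiza_sentimiento(words, positivos, negativos, neutros):
--     # Single fused pass: running top-weight trackers replace A's post-loop max/min + filter passes.
--     total = 0
--     pos_words = []
--     neg_words = []
--     neut_words = []
--     top_pos = None  # (weight, words with that weight, in order)
--     top_neg = None
--     for w in words:
--         if w in positivos:
--             p = positivos[w]
--             total += p
--             pos_words.append(w)
--             if top_pos is None or p > top_pos[0]:
--                 top_pos = [p, [w]]
--             elif p == top_pos[0]:
--                 top_pos[1].append(w)
--         elif w in negativos:
--             n = negativos[w]
--             total += n
--             neg_words.append(w)
--             if top_neg is None or n < top_neg[0]: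
--                 top_neg = [n, [w]]
--             elif n == top_neg[0]:
--                 top_neg[1].append(w)
--         elif w in neutros:
--             neut_words.append(w)
--     tpw, tpl = top_pos if top_pos is not None else (0, [])
--     tnw, tnl = top_neg if top_neg is not None else (0, [])
--     return (total,
--             len(pos_words), pos_words, tpl, tpw,
--             len(neg_words), neg_words, tnl, tnw,
--             len(neut_words), neut_words)
-- ===== Notes on version B (the rewrite author's own statement) =====
-- stated objective: alternative
-- what changed: B fuses everything into one pass: instead of A's recorded (word,weight) lists post-processed by max()/min() and filter comprehensions, B maintains running top-weight trackers (reset on strictly better weight, append on tie) during the single classification loop.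
import Mathlib
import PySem

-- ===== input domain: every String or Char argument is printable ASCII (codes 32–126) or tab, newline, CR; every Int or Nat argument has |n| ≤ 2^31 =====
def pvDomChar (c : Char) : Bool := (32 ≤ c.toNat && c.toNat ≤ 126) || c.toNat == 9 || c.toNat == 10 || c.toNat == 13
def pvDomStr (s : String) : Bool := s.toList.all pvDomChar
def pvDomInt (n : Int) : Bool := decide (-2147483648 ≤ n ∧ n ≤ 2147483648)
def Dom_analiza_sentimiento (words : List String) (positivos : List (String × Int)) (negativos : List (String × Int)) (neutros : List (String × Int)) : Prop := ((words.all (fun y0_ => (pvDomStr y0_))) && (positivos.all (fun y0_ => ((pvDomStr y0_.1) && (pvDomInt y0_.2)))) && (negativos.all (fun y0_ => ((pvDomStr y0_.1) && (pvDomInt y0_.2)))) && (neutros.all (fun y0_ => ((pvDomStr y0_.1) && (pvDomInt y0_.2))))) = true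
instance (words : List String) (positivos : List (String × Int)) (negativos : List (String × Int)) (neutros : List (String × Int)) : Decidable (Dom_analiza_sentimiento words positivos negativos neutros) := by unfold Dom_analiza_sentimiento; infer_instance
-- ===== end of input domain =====

-- B fuses A's classify-then-postprocess structure into one pass with running top-weight
-- trackers; same return value, no speed claim (objective: alternative).

-- ===== PORT A =====
-- the classification loop body of A (state: total, pos_list, neg_list, neut_list)
def stepA (positivos negativos neutros : List (String × Int))
    (st : Int × List (String × Int) × List (String × Int) × List String) (w : String) :
    Int × List (String × Int) × List (String × Int) × List String :=
  let (total, pos_list, neg_list, neut_list) := st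
  match (PySem.Dict.mk positivos).get? w with
  | some p => (total + p, pos_list ++ [(w, p)], neg_list, neut_list)
  | none =>
    match (PySem.Dict.mk negativos).get? w with
    | some n => (total + n, pos_list, neg_list ++ [(w, n)], neut_list)
    | none =>
      if ((PySem.Dict.mk neutros).get? w).isSome then
        (total, pos_list, neg_list, neut_list ++ [w])
      else (total, pos_list, neg_list, neut_list)

def analiza_sentimiento (words : List String) (positivos : List (String × Int)) (negativos : List (String × Int)) (neutros : List (String × Int)) : Int × Int × List String × List String × Int × Int × List String × List String × Int × Int × List String :=
  let st := words.foldl (stepA positivos negativos neutros) (0, [], [], [])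
  let (total, pos_list, neg_list, neut_list) := st
  let pos_words := pos_list.map Prod.fst
  let neg_words := neg_list.map Prod.fst
  let tp :=
    match pos_list.map Prod.snd with
    | [] => ((0 : Int), ([] : List String))
    | x :: xs =>
      let m := xs.foldl max x
      (m, (pos_list.filter (fun wp : String × Int => wp.2 == m)).map Prod.fst)
  let tn :=
    match neg_list.map Prod.snd with
    | [] => ((0 : Int), ([] : List String))
    | x :: xs =>
      let m := xs.foldl min x
      (m, (neg_list.filter (fun wn : String × Int => wn.2 == m)).map Prod.fst)
  (total, (pos_list.length : Int), pos_words, tp.2, tp.1,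
   (neg_list.length : Int), neg_words, tn.2, tn.1,
   (neut_list.length : Int), neut_list)

-- ===== PORT B =====
-- B's single-pass loop body (state: total, pos_words, neg_words, neut_words, top_pos, top_neg)
def stepB (positivos negativos neutros : List (String × Int))
    (st : Int × List String × List String × List String × Option (Int × List String) × Option (Int × List String)) (w : String) :
    Int × List String × List String × List String × Option (Int × List String) × Option (Int × List String) :=
  let (total, posW, negW, neutW, tp, tn) := st
  match (PySem.Dict.mk positivos).get? w with
  | some p =>
    let tp' :=
      match tp with
      | none => some (p, [w])
      | some (m, ws) =>
        if p > m then some (p, [w])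
        else if p = m then some (m, ws ++ [w])
        else some (m, ws)
    (total + p, posW ++ [w], negW, neutW, tp', tn)
  | none =>
    match (PySem.Dict.mk negativos).get? w with
    | some n =>
      let tn' :=
        match tn with
        | none => some (n, [w])
        | some (m, ws) =>
          if n < m then some (n, [w])
          else if n = m then some (m, ws ++ [w])
          else some (m, ws)
      (total + n, posW, negW ++ [w], neutW, tp, tn')
    | none =>
      if ((PySem.Dict.mk neutros).get? w).isSome then
        (total, posW, negW, neutW ++ [w], tp, tn)
      else (total, posW, negW, neutW, tp, tn)

def analiza_sentimiento_alt (words : List String) (positivos : List (String × Int)) (negativos : List (String × Int)) (neutros : List (String × Int)) : Int × Int × List String × List String × Int × Int × List String × List String × Int × Int × List String :=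
  let st := words.foldl (stepB positivos negativos neutros) (0, [], [], [], none, none)
  let (total, posW, negW, neutW, tp, tn) := st
  let (tpw, tpl) := tp.getD (0, [])
  let (tnw, tnl) := tn.getD (0, [])
  (total, (posW.length : Int), posW, tpl, tpw,
   (negW.length : Int), negW, tnl, tnw,
   (neutW.length : Int), neutW)

-- ===== PRECONDITION & SPEC =====
def Spec_analiza_sentimiento (words : List String) (positivos : List (String × Int)) (negativos : List (String × Int)) (neutros : List (String × Int)) (out : Int × Int × List String × List String × Int × Int × List String × List String × Int × Int × List String) : Prop := out = analiza_sentimiento_alt words positivos negativos neutros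
instance (words : List String) (positivos : List (String × Int)) (negativos : List (String × Int)) (neutros : List (String × Int)) (out : Int × Int × List String × List String × Int × Int × List String × List String × Int × Int × List String) : Decidable (Spec_analiza_sentimiento words positivos negativos neutros out) := by
  unfold Spec_analiza_sentimiento
  -- the 11-fold product is too deep for default instance search; chain DecidableEq by hand
  letI d1 : DecidableEq (Int × List String) := instDecidableEqProd
  letI d2 : DecidableEq (Int × Int × List String) := instDecidableEqProd
  letI d3 : DecidableEq (List String × Int × Int × List String) := instDecidableEqProd
  letI d4 : DecidableEq (List String × List String × Int × Int × List String) := instDecidableEqProd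
  letI d5 : DecidableEq (Int × List String × List String × Int × Int × List String) := instDecidableEqProd
  letI d6 : DecidableEq (Int × Int × List String × List String × Int × Int × List String) := instDecidableEqProd
  letI d7 : DecidableEq (List String × Int × Int × List String × List String × Int × Int × List String) := instDecidableEqProd
  letI d8 : DecidableEq (List String × List String × Int × Int × List String × List String × Int × Int × List String) := instDecidableEqProd
  letI d9 : DecidableEq (Int × List String × List String × Int × Int × List String × List String × Int × Int × List String) := instDecidableEqProd
  letI d10 : DecidableEq (Int × Int × List String × List String × Int × Int × List String × List String × Int × Int × List String) := instDecidableEqProd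
  exact d10 _ _

-- ===== CLAIM (what is proved, stated in full; the proofs are below) =====
def Claim_equal_analiza_sentimiento : Prop := ∀ (words : List String) (positivos : List (String × Int)) (negativos : List (String × Int)) (neutros : List (String × Int)), Dom_analiza_sentimiento words positivos negativos neutros → Spec_analiza_sentimiento words positivos negativos neutros (analiza_sentimiento words positivos negativos neutros)

-- ===== LEMMAS AND PROOFS =====

-- abstraction: the top-tracker that B maintains, expressed from A's recorded list
def topOf (pl : List (String × Int)) : Option (Int × List String) :=
  match pl.map Prod.snd with
  | [] => none
  | x :: xs =>
    let m := xs.foldl max x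
    some (m, (pl.filter (fun wp : String × Int => wp.2 == m)).map Prod.fst)

def botOf (nl : List (String × Int)) : Option (Int × List String) :=
  match nl.map Prod.snd with
  | [] => none
  | x :: xs =>
    let m := xs.foldl min x
    some (m, (nl.filter (fun wn : String × Int => wn.2 == m)).map Prod.fst)

lemma le_foldl_max (xs : List Int) (x : Int) : x ≤ xs.foldl max x := by
  induction xs generalizing x with
  | nil => simp
  | cons a as ih => exact le_trans (le_max_left x a) (ih (max x a))

lemma mem_le_foldl_max (xs : List Int) (x y : Int) (h : y = x ∨ y ∈ xs) : y ≤ xs.foldl max x := by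
  induction xs generalizing x with
  | nil =>
    rcases h with h | h
    · simp [h]
    · simp at h
  | cons a as ih =>
    simp only [List.foldl_cons]
    rcases h with h | h
    · subst h; exact le_trans (le_max_left y a) (le_foldl_max as (max y a))
    · rw [List.mem_cons] at h
      rcases h with h | h
      · subst h; exact le_trans (le_max_right x y) (le_foldl_max as (max x y))
      · exact ih (max x a) (Or.inr h)

lemma foldl_min_le (xs : List Int) (x : Int) : xs.foldl min x ≤ x := by
  induction xs generalizing x with
  | nil => simp
  | cons a as ih => exact le_trans (ih (min x a)) (min_le_left x a)

lemma foldl_min_le_mem (xs : List Int) (x y : Int) (h : y = x ∨ y ∈ xs) : xs.foldl min x ≤ y := by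
  induction xs generalizing x with
  | nil =>
    rcases h with h | h
    · simp [h]
    · simp at h
  | cons a as ih =>
    simp only [List.foldl_cons]
    rcases h with h | h
    · subst h; exact le_trans (foldl_min_le as (min y a)) (min_le_left y a)
    · rw [List.mem_cons] at h
      rcases h with h | h
      · subst h; exact le_trans (foldl_min_le as (min x y)) (min_le_right x y)
      · exact ih (min x a) (Or.inr h)

lemma topOf_append (pl : List (String × Int)) (w : String) (p : Int) :
    topOf (pl ++ [(w, p)]) =
      match topOf pl with
      | none => some (p, [w])
      | some (m, ws) =>
        if p > m then some (p, [w])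
        else if p = m then some (m, ws ++ [w])
        else some (m, ws) := by
  cases pl with
  | nil => simp [topOf]
  | cons hd tl =>
    unfold topOf
    simp only [List.cons_append, List.map_cons, List.map_append, List.map_nil,
      List.foldl_append, List.foldl_cons, List.foldl_nil]
    generalize hM : (tl.map Prod.snd).foldl max hd.2 = m
    have hmem : ∀ a : String × Int, a ∈ hd :: tl → a.2 ≤ m := by
      intro a ha
      rw [← hM]
      rw [List.mem_cons] at ha
      refine mem_le_foldl_max _ _ _ ?_
      rcases ha with ha | ha
      · exact Or.inl (by rw [ha])
      · exact Or.inr (List.mem_map_of_mem ha)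
    rcases lt_trichotomy m p with hlt | heq | hgt
    · rw [max_eq_right hlt.le, if_pos hlt]
      have h2 : (hd :: tl).filter (fun wp : String × Int => wp.2 == p) = [] := by
        rw [List.filter_eq_nil_iff]
        intro a ha
        have := hmem a ha
        simp only [beq_iff_eq]; omega
      rw [show hd :: (tl ++ [(w, p)]) = (hd :: tl) ++ [(w, p)] from rfl,
        List.filter_append, h2]
      simp
    · subst heq
      rw [max_self, if_neg (lt_irrefl m), if_pos rfl]
      rw [show hd :: (tl ++ [(w, m)]) = (hd :: tl) ++ [(w, m)] from rfl,
        List.filter_append]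
      simp
    · rw [max_eq_left hgt.le, if_neg (by omega), if_neg (by omega)]
      rw [show hd :: (tl ++ [(w, p)]) = (hd :: tl) ++ [(w, p)] from rfl,
        List.filter_append]
      have : ((p : Int) == m) = false := by simp; omega
      simp [this]

lemma botOf_append (nl : List (String × Int)) (w : String) (n : Int) :
    botOf (nl ++ [(w, n)]) =
      match botOf nl with
      | none => some (n, [w])
      | some (m, ws) =>
        if n < m then some (n, [w])
        else if n = m then some (m, ws ++ [w])
        else some (m, ws) := by
  cases nl with
  | nil => simp [botOf]
  | cons hd tl =>
    unfold botOf
    simp only [List.cons_append, List.map_cons, List.map_append, List.map_nil,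
      List.foldl_append, List.foldl_cons, List.foldl_nil]
    generalize hM : (tl.map Prod.snd).foldl min hd.2 = m
    have hmem : ∀ a : String × Int, a ∈ hd :: tl → m ≤ a.2 := by
      intro a ha
      rw [← hM]
      rw [List.mem_cons] at ha
      refine foldl_min_le_mem _ _ _ ?_
      rcases ha with ha | ha
      · exact Or.inl (by rw [ha])
      · exact Or.inr (List.mem_map_of_mem ha)
    rcases lt_trichotomy n m with hlt | heq | hgt
    · rw [min_eq_right hlt.le, if_pos hlt]
      have h2 : (hd :: tl).filter (fun wn : String × Int => wn.2 == n) = [] := by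
        rw [List.filter_eq_nil_iff]
        intro a ha
        have := hmem a ha
        simp only [beq_iff_eq]; omega
      rw [show hd :: (tl ++ [(w, n)]) = (hd :: tl) ++ [(w, n)] from rfl,
        List.filter_append, h2]
      simp
    · subst heq
      rw [min_self, if_neg (lt_irrefl n), if_pos rfl]
      rw [show hd :: (tl ++ [(w, n)]) = (hd :: tl) ++ [(w, n)] from rfl,
        List.filter_append]
      simp
    · rw [min_eq_left hgt.le, if_neg (by omega), if_neg (by omega)]
      rw [show hd :: (tl ++ [(w, n)]) = (hd :: tl) ++ [(w, n)] from rfl,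
        List.filter_append]
      have : ((n : Int) == m) = false := by simp; omega
      simp [this]

-- the abstraction from A's loop state to B's loop state
def abstr (st : Int × List (String × Int) × List (String × Int) × List String) :
    Int × List String × List String × List String × Option (Int × List String) × Option (Int × List String) :=
  (st.1, st.2.1.map Prod.fst, st.2.2.1.map Prod.fst, st.2.2.2, topOf st.2.1, botOf st.2.2.1)

lemma loop_rel (positivos negativos neutros : List (String × Int)) (words : List String) :
    ∀ st, words.foldl (stepB positivos negativos neutros) (abstr st)
      = abstr (words.foldl (stepA positivos negativos neutros) st) := by
  induction words with
  | nil => intro st; rfl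
  | cons w ws ih =>
    intro st
    obtain ⟨total, pl, nl, ul⟩ := st
    simp only [List.foldl_cons]
    rw [← ih]
    congr 1
    simp only [stepA, stepB, abstr]
    cases hp : (PySem.Dict.mk positivos).get? w with
    | some p =>
      simp only [List.map_append, List.map_cons, List.map_nil]
      rw [topOf_append]
    | none =>
      cases hn : (PySem.Dict.mk negativos).get? w with
      | some n =>
        simp only [List.map_append, List.map_cons, List.map_nil]
        rw [botOf_append]
      | none =>
        by_cases hu : ((PySem.Dict.mk neutros).get? w).isSome <;> simp [hu]

-- ===== VERDICT (by name: the statement is the Claim_ definition above) =====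
theorem analiza_sentimiento_spec : Claim_equal_analiza_sentimiento := by
  intro words positivos negativos neutros _
  unfold Spec_analiza_sentimiento analiza_sentimiento analiza_sentimiento_alt
  have h := loop_rel positivos negativos neutros words (0, [], [], [])
  have h0 : abstr ((0 : Int), ([] : List (String × Int)), ([] : List (String × Int)), ([] : List String))
      = ((0 : Int), ([] : List String), ([] : List String), ([] : List String),
         (none : Option (Int × List String)), (none : Option (Int × List String))) := by
    simp [abstr, topOf, botOf]
  rw [h0] at h
  rw [h]
  obtain ⟨total, pl, nl, ul⟩ := words.foldl (stepA positivos negativos neutros) (0, [], [], [])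
  simp only [abstr]
  cases pl with
  | nil => cases nl <;> simp [topOf, botOf]
  | cons a as =>
    cases nl with
    | nil => simp [topOf, botOf]
    | cons b bs => simp [topOf, botOf]
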